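-- pv_equiv track=rewrite | github.com/fu351/SecretSauce | scripts/store_maintenance_utils/common.py | parse_token_set
-- ===== SOURCE A (Python) =====
-- from typing import Iterable
--
-- def parse_token_set(values: Iterable[str] | None) -> set[str]:
--     """Expand comma/space-separated tokens into a normalized set."""
--     expanded: list[str] = []
--     for raw in values or []:
--         if not raw:
--             continue
--         for part in str(raw).replace(",", " ").split():
--             candidate = part.strip()
--             if candidate:
--                 expanded.append(candidate)
--     return set(expanded)
-- ===== SOURCE B (Python) =====
-- def parse_token_set(values):
--     """Expand comma/space-separated tokens into a normalized set."""
--     tokens = set()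
--     for raw in values or []:
--         if not raw:
--             continue
--         cur = []
--         for ch in str(raw):
--             if ch == "," or ch.isspace():
--                 if cur:
--                     tokens.add("".join(cur))
--                     cur = []
--             else:
--                 cur.append(ch)
--         if cur:
--             tokens.add("".join(cur))
--     return tokens
-- ===== Notes on version B (the rewrite author's own statement) =====
-- stated objective: alternative
-- what changed: Replaces A's per-element replace(',',' ')+split() library tokenization and intermediate expanded list with a hand-written single-pass character scanner that buffers each token and adds it to the set directly at each delimiter.
import Mathlib
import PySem

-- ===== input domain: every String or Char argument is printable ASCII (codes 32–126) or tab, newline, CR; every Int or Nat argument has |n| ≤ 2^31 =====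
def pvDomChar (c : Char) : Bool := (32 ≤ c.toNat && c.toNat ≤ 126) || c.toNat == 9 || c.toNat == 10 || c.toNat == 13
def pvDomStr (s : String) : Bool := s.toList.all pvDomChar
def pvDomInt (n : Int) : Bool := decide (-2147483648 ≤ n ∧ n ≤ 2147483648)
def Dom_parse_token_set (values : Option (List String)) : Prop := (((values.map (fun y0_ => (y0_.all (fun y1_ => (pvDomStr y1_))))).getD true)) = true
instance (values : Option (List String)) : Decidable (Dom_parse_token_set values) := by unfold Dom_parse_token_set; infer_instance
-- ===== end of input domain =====

-- B replaces A's per-element replace+split library tokenization and intermediate list with a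
-- hand-written single-pass character scanner that adds each completed token to the set directly (objective: alternative).


-- ===== PORT A =====
-- literal port of A: loop over `values or []`, skip falsy elements, split each element on
-- commas/whitespace via replace+split, strip each part, append nonempty candidates, return the set.
def parse_token_set (values : Option (List String)) : List String :=
  let expanded : List String :=
    (values.getD []).foldl
      (fun expanded raw =>
        if raw == "" then expanded
        else
          (PySem.Str.split₀ (PySem.Str.replace raw "," " ")).foldl
            (fun expanded part =>
              let candidate := PySem.Str.strip part
              if candidate == "" then expanded else expanded ++ [candidate])
            expanded)
      []
  PySem.Set.ofList expanded

-- ===== PORT B =====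
-- literal port of Source B: for each truthy element, scan its characters once with a `cur` buffer,
-- flushing the buffered token into the set at each ','/whitespace delimiter and at the end.
def parse_token_set_alt (values : Option (List String)) : List String :=
  (values.getD []).foldl
    (fun tokens raw =>
      if raw == "" then tokens
      else
        let st :=
          raw.toList.foldl
            (fun (p : PySem.Set String × List Char) ch =>
              if ch == ',' || PySem.Chars.isspace ch then
                if p.2.isEmpty then (p.1, []) else (PySem.Set.add p.1 (String.ofList p.2), [])
              else (p.1, p.2 ++ [ch]))
            (tokens, [])
        if st.2.isEmpty then st.1 else PySem.Set.add st.1 (String.ofList st.2))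
    PySem.Set.empty

-- ===== PRECONDITION & SPEC =====
def Spec_parse_token_set (values : Option (List String)) (out : List String) : Prop := out = parse_token_set_alt values
instance (values : Option (List String)) (out : List String) : Decidable (Spec_parse_token_set values out) := by unfold Spec_parse_token_set; infer_instance

-- ===== CLAIM (what is proved, stated in full; the proofs are below) =====
def Claim_equal_parse_token_set : Prop := ∀ (values : Option (List String)), Dom_parse_token_set values → Spec_parse_token_set values (parse_token_set values)

-- ===== LEMMAS AND PROOFS =====

def pvSub (c : Char) : Char := if c == ',' then ' ' else c

theorem pvReplace_go_comma (fuel : Nat) : ∀ (s acc : List Char), s.length ≤ fuel →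
    PySem.Chars.replace.go [','] [' '] fuel s acc = acc.reverse ++ s.map pvSub := by
  induction fuel with
  | zero => intro s acc h; cases s with
    | nil => simp [PySem.Chars.replace.go]
    | cons c t => simp at h
  | succ n ih => intro s acc h; cases s with
    | nil => simp [PySem.Chars.replace.go]
    | cons c t =>
      by_cases hc : c = ','
      · subst hc
        rw [show PySem.Chars.replace.go [','] [' '] (n+1) (',' :: t) acc
            = PySem.Chars.replace.go [','] [' '] n t (' ' :: acc) by
          simp [PySem.Chars.replace.go, List.isPrefixOf]]
        rw [ih t (' ' :: acc) (by simpa using Nat.le_of_succ_le_succ (by simpa using h))]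
        simp [pvSub]
      · rw [show PySem.Chars.replace.go [','] [' '] (n+1) (c :: t) acc
            = PySem.Chars.replace.go [','] [' '] n t (c :: acc) by
          simp [PySem.Chars.replace.go, List.isPrefixOf, Ne.symm hc]]
        rw [ih t (c :: acc) (by simpa using Nat.le_of_succ_le_succ (by simpa using h))]
        simp [pvSub, hc]

theorem pvReplace_comma (s : List Char) :
    PySem.Chars.replace s [','] [' '] = s.map pvSub := by
  rw [PySem.Chars.replace]
  simp
  exact pvReplace_go_comma s.length s [] le_rfl

theorem pvGo_acc (s : List Char) : ∀ (cur : List Char) (acc : List (List Char)),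
    PySem.Chars.split₀.go s cur acc = acc.reverse ++ PySem.Chars.split₀.go s cur [] := by
  induction s with
  | nil => intro cur acc
           by_cases hc : cur.isEmpty <;> simp [PySem.Chars.split₀.go, hc]
  | cons c t ih =>
    intro cur acc
    by_cases hs : PySem.Chars.isspace c
    · by_cases hc : cur.isEmpty
      · rw [show PySem.Chars.split₀.go (c :: t) cur acc = PySem.Chars.split₀.go t [] acc by
              rw [PySem.Chars.split₀.go.eq_def]; simp [hs, hc],
            show PySem.Chars.split₀.go (c :: t) cur [] = PySem.Chars.split₀.go t [] [] by
              rw [PySem.Chars.split₀.go.eq_def]; simp [hs, hc]]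
        exact ih [] acc
      · rw [show PySem.Chars.split₀.go (c :: t) cur acc
            = PySem.Chars.split₀.go t [] (cur.reverse :: acc) by simp [PySem.Chars.split₀.go, hs, hc],
           show PySem.Chars.split₀.go (c :: t) cur []
            = PySem.Chars.split₀.go t [] [cur.reverse] by simp [PySem.Chars.split₀.go, hs, hc]]
        rw [ih [] (cur.reverse :: acc), ih [] [cur.reverse]]
        simp
    · simp only [show ∀ acc, PySem.Chars.split₀.go (c :: t) cur acc
            = PySem.Chars.split₀.go t (c :: cur) acc from fun acc => by simp [PySem.Chars.split₀.go, hs]]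
      exact ih _ _

theorem pvGo_mem (s : List Char) : ∀ (cur : List Char) (acc : List (List Char)) (t : List Char),
    (∀ c ∈ cur, PySem.Chars.isspace c = false) →
    (∀ u ∈ acc, u ≠ [] ∧ ∀ c ∈ u, PySem.Chars.isspace c = false) →
    t ∈ PySem.Chars.split₀.go s cur acc → t ≠ [] ∧ ∀ c ∈ t, PySem.Chars.isspace c = false := by
  induction s with
  | nil =>
    intro cur acc t hcur hacc ht
    rw [PySem.Chars.split₀.go.eq_def] at ht
    by_cases hc : cur.isEmpty
    · simp [hc] at ht
      exact hacc t ht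
    · simp [hc] at ht
      rcases ht with h | h
      · exact hacc t h
      · subst h
        refine ⟨by simpa [List.isEmpty_iff] using hc, ?_⟩
        intro c hc'
        exact hcur c (List.mem_reverse.mp hc')
  | cons a r ih =>
    intro cur acc t hcur hacc ht
    rw [PySem.Chars.split₀.go.eq_def] at ht
    by_cases hs : PySem.Chars.isspace a
    · by_cases hc : cur.isEmpty
      · simp [hs, hc] at ht
        exact ih [] acc t (by simp) hacc ht
      · simp [hs, hc] at ht
        refine ih [] (cur.reverse :: acc) t (by simp) ?_ ht
        intro u hu
        rcases List.mem_cons.mp hu with h | h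
        · subst h
          exact ⟨by simpa [List.isEmpty_iff] using hc, fun c hc' => hcur c (List.mem_reverse.mp hc')⟩
        · exact hacc u h
    · simp [hs] at ht
      refine ih (a :: cur) acc t ?_ hacc ht
      intro c hc'
      rcases List.mem_cons.mp hc' with h | h
      · subst h; simpa using hs
      · exact hcur c h

theorem pvSplit₀_mem (s t : List Char) (ht : t ∈ PySem.Chars.split₀ s) :
    t ≠ [] ∧ ∀ c ∈ t, PySem.Chars.isspace c = false := by
  exact pvGo_mem s [] [] t (by simp) (by simp) ht

theorem pvDropWhile_id (u : List Char) (h : ∀ c ∈ u, PySem.Chars.isspace c = false) :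
    u.dropWhile PySem.Chars.isspace = u := by
  cases u with
  | nil => simp
  | cons c v => rw [List.dropWhile_cons_of_neg (by simp [h c (by simp)])]

theorem pvStrip_id (t : List Char) (h : ∀ c ∈ t, PySem.Chars.isspace c = false) :
    PySem.Chars.strip t = t := by
  rw [PySem.Chars.strip, PySem.Chars.lstrip, PySem.Chars.rstrip]
  rw [pvDropWhile_id t h, pvDropWhile_id t.reverse (fun c hc => h c (List.mem_reverse.mp hc)),
    List.reverse_reverse]

def pvTokens (s : String) : List String := PySem.Str.split₀ (PySem.Str.replace s "," " ")

theorem pvTokens_mem (s part : String) (h : part ∈ pvTokens s) :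
    PySem.Str.strip part = part ∧ (part == "") = false := by
  rw [pvTokens, PySem.Str.split₀] at h
  rcases List.mem_map.mp h with ⟨u, hu, rfl⟩
  obtain ⟨hne, hns⟩ := pvSplit₀_mem _ u hu
  constructor
  · rw [PySem.Str.strip, String.toList_ofList, pvStrip_id u hns]
  · refine beq_eq_false_iff_ne.mpr ?_
    intro hcontra
    exact hne (by simpa using congrArg String.toList hcontra)

theorem pvInner_fold (s : String) (acc : List String) :
    (pvTokens s).foldl
      (fun expanded part =>
        let candidate := PySem.Str.strip part
        if candidate == "" then expanded else expanded ++ [candidate]) acc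
    = acc ++ pvTokens s := by
  refine (PySem.List.foldl_congr_mem _ _ (fun expanded part => expanded ++ [part]) acc
    ?_).trans (PySem.List.foldl_append_singleton _ _)
  intro a x hx
  obtain ⟨h1, h2⟩ := pvTokens_mem s x hx
  simp [h1, h2]

theorem pvTokens_eq (s : String) :
    pvTokens s = (PySem.Chars.split₀.go (s.toList.map pvSub) [] []).map String.ofList := by
  rw [pvTokens, PySem.Str.split₀, PySem.Str.toList_replace,
    show (",".toList) = [','] from rfl, show (" ".toList) = [' '] from rfl, pvReplace_comma]
  rfl

-- the scanner step of B's inner loop, named for the proofs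
def pvStep (p : PySem.Set String × List Char) (ch : Char) : PySem.Set String × List Char :=
  if ch == ',' || PySem.Chars.isspace ch then
    if p.2.isEmpty then (p.1, []) else (PySem.Set.add p.1 (String.ofList p.2), [])
  else (p.1, p.2 ++ [ch])

theorem pvSub_isspace (c : Char) :
    PySem.Chars.isspace (pvSub c) = (c == ',' || PySem.Chars.isspace c) := by
  by_cases h : c = ','
  · subst h; simp [pvSub]; decide
  · simp [pvSub, h]

theorem pvScan (s : List Char) : ∀ (cur : List Char) (tokens : PySem.Set String),
    (let st := s.foldl pvStep (tokens, cur);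
     if st.2.isEmpty then st.1 else PySem.Set.add st.1 (String.ofList st.2))
    = PySem.Set.update tokens
        ((PySem.Chars.split₀.go (s.map pvSub) cur.reverse []).map String.ofList) := by
  induction s with
  | nil =>
    intro cur tokens
    by_cases hc : cur.isEmpty
    · have : cur = [] := by simpa [List.isEmpty_iff] using hc
      subst this
      simp [PySem.Chars.split₀.go, PySem.Set.update]
    · have hrc : cur.reverse.isEmpty = false := by cases cur <;> simp_all
      simp only [List.foldl_nil, List.map_nil, hc]
      rw [show PySem.Chars.split₀.go [] cur.reverse []
          = [cur] by simp [PySem.Chars.split₀.go, hrc]]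
      simp [PySem.Set.update, hc]
  | cons c t ih =>
    intro cur tokens
    simp only [List.foldl_cons, List.map_cons]
    by_cases hd : (c == ',' || PySem.Chars.isspace c) = true
    · have hsp : PySem.Chars.isspace (pvSub c) = true := by rw [pvSub_isspace]; exact hd
      by_cases hc : cur.isEmpty
      · have : cur = [] := by simpa [List.isEmpty_iff] using hc
        subst this
        rw [show pvStep (tokens, ([]:List Char)) c = (tokens, []) by simp [pvStep, hd]]
        rw [show PySem.Chars.split₀.go (pvSub c :: t.map pvSub) ([]:List Char).reverse []
            = PySem.Chars.split₀.go (t.map pvSub) [] [] by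
          rw [PySem.Chars.split₀.go.eq_def]; simp [hsp]]
        exact ih [] tokens
      · rw [show pvStep (tokens, cur) c
            = (PySem.Set.add tokens (String.ofList cur), []) by simp [pvStep, hd, hc]]
        rw [show PySem.Chars.split₀.go (pvSub c :: t.map pvSub) cur.reverse []
            = PySem.Chars.split₀.go (t.map pvSub) [] [cur] by
          rw [PySem.Chars.split₀.go.eq_def]; simp [hsp, hc]]
        rw [pvGo_acc (t.map pvSub) [] [cur]]
        rw [ih [] (PySem.Set.add tokens (String.ofList cur))]
        simp [PySem.Set.update]
    · obtain ⟨h1, h2⟩ : ¬c = ',' ∧ PySem.Chars.isspace c = false := by simpa using hd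
      have hsp : PySem.Chars.isspace (pvSub c) = false := by
        rw [pvSub_isspace]; simp [h1, h2]
      rw [show pvStep (tokens, cur) c = (tokens, cur ++ [c]) by simp [pvStep, hd]]
      rw [show PySem.Chars.split₀.go (pvSub c :: t.map pvSub) cur.reverse []
          = PySem.Chars.split₀.go (t.map pvSub) (c :: cur.reverse) [] by
        rw [PySem.Chars.split₀.go.eq_def]
        simp [pvSub, h1, h2]]
      have := ih (cur ++ [c]) tokens
      simpa using this

-- B's per-element step adds exactly that element's tokens to the set
theorem pvBStep (tokens : PySem.Set String) (raw : String) :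
    (if raw == "" then tokens
     else
       let st := raw.toList.foldl pvStep (tokens, []);
       if st.2.isEmpty then st.1 else PySem.Set.add st.1 (String.ofList st.2))
    = PySem.Set.update tokens (pvTokens raw) := by
  by_cases h : raw == ""
  · have : raw = "" := by simpa using h
    subst this
    simp [h, show pvTokens "" = [] from rfl, PySem.Set.update]
  · simp only [h, if_false]
    rw [pvScan raw.toList [] tokens, pvTokens_eq]
    rfl

theorem pvFoldUpdate (l : List String) : ∀ (t : PySem.Set String),
    l.foldl (fun t raw => PySem.Set.update t (pvTokens raw)) t
      = PySem.Set.update t (l.flatMap pvTokens) := by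
  induction l with
  | nil => intro t; simp [PySem.Set.update]
  | cons a r ih =>
    intro t
    rw [List.foldl_cons, ih, List.flatMap_cons]
    simp [PySem.Set.update, List.foldl_append]

theorem pvFlatMap_filter (l : List String) :
    (l.filter (fun r => r != "")).flatMap pvTokens = l.flatMap pvTokens := by
  induction l with
  | nil => rfl
  | cons a r ih =>
    by_cases h : a = ""
    · subst h
      simpa [List.filter_cons, show pvTokens "" = [] from rfl] using ih
    · simp [List.filter_cons, h, ih]

theorem parse_token_set_eq (values : Option (List String)) :
    parse_token_set values = parse_token_set_alt values := by
  unfold parse_token_set parse_token_set_alt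
  rw [PySem.List.foldl_congr_mem _ _
      (fun acc raw => if (raw != "") = true then acc ++ pvTokens raw else acc) []
      (by intro acc raw _
          by_cases h : raw == ""
          · have hr : raw = "" := by simpa using h
            simp [hr]
          · simp only [h, bne, Bool.not_false, if_true]
            exact pvInner_fold raw acc)]
  rw [PySem.List.foldl_if_eq_foldl_filter, PySem.List.foldl_append_eq_flatMap,
    List.nil_append, pvFlatMap_filter]
  rw [PySem.List.foldl_congr_mem _ _
      (fun tokens raw => PySem.Set.update tokens (pvTokens raw)) PySem.Set.empty
      (by intro tokens raw _; exact pvBStep tokens raw)]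
  rw [pvFoldUpdate]
  rfl

-- ===== VERDICT (by name: the statement is the Claim_ definition above) =====
theorem parse_token_set_spec : Claim_equal_parse_token_set := by
  intro values _
  exact parse_token_set_eq values
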